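-- pv_equiv track=rewrite | github.com/mongodb/docs | content/tools/atlas-cli-commands-toc/fix_rst_syntax.py | fix_backticks
-- ===== SOURCE A (Python) =====
-- def fix_backticks(content):
--     """Fix single backticks to double backticks for monospace text."""
--     fixes = [
--         ('`mongos`', '``mongos``'),
--         ('(`&`)', '(``&``)'),
--         ('`admin`', '``admin``'),
--         ('(`%2F`)', '(``%2F``)'),
--         ('"flattenTeams" : true', '``"flattenTeams" : true``'),
--         ('"includeOrgUsers": true', '``"includeOrgUsers": true``'),
--         ('repeat the `m` parameter', 'repeat the ``m`` parameter'),
--     ]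
--
--     for old, new in fixes:
--         content = content.replace(old, new)
--
--     return content
-- ===== SOURCE B (Python) =====
-- def fix_backticks(content):
--     """Fix single backticks to double backticks for monospace text."""
--     fixes = [
--         ('`mongos`', '``mongos``'),
--         ('(`&`)', '(``&``)'),
--         ('`admin`', '``admin``'),
--         ('(`%2F`)', '(``%2F``)'),
--         ('"flattenTeams" : true', '``"flattenTeams" : true``'),
--         ('"includeOrgUsers": true', '``"includeOrgUsers": true``'),
--         ('repeat the `m` parameter', 'repeat the ``m`` parameter'),
--     ]
--
--     out = []
--     i = 0
--     n = len(content)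
--     while i < n:
--         for old, new in fixes:
--             if content.startswith(old, i):
--                 out.append(new)
--                 i += len(old)
--                 break
--         else:
--             out.append(content[i])
--             i += 1
--     return ''.join(out)
-- ===== Notes on version B (the rewrite author's own statement) =====
-- stated objective: alternative
-- what changed: Seven sequential whole-string str.replace passes are replaced by a single left-to-right table-driven scan that tries the fixed patterns at each position and emits the replacement (or the character) in one pass; Pre_ excludes inputs where two of the replaced backtick patterns overlap on a shared backtick (the cited fused substrings), on which A's sequential replaces double-use the shared character and either reading of the corner is defensible.
-- outside the precondition, e.g. on fix_backticks('`mongos`admin`'): A returns '``mongos```admin``', B returns '``mongos``admin`'; on fix_backticks('`admin`mongos`'): A returns '``admin```mongos``', B returns '``admin``mongos`'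
import Mathlib
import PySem

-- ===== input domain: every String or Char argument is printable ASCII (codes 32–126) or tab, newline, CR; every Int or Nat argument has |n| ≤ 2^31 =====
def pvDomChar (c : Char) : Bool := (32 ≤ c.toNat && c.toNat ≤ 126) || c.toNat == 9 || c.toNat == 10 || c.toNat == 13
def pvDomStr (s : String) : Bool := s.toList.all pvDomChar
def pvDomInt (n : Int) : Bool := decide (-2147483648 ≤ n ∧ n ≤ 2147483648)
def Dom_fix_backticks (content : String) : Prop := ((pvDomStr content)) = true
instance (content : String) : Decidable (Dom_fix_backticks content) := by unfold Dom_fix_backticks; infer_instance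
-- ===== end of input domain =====

-- B replaces A's seven sequential whole-string replace passes by a single left-to-right
-- table-driven scan (alternative decomposition, same result on Pre_; return value only).


-- ===== PORT A =====
def fix_backticks (content : String) : String :=
  let fixes : List (String × String) :=
    [("`mongos`", "``mongos``"),
     ("(`&`)", "(``&``)"),
     ("`admin`", "``admin``"),
     ("(`%2F`)", "(``%2F``)"),
     ("\"flattenTeams\" : true", "``\"flattenTeams\" : true``"),
     ("\"includeOrgUsers\": true", "``\"includeOrgUsers\": true``"),
     ("repeat the `m` parameter", "repeat the ``m`` parameter")]
  fixes.foldl (fun content p => PySem.Str.replace content p.1 p.2) content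

-- ===== PORT B =====
-- the same fixes table, kept as lists of characters (Source B's list of (old, new) pairs)
def pvAltFixes : List (List Char × List Char) :=
  [("`mongos`".toList, "``mongos``".toList),
   ("(`&`)".toList, "(``&``)".toList),
   ("`admin`".toList, "``admin``".toList),
   ("(`%2F`)".toList, "(``%2F``)".toList),
   ("\"flattenTeams\" : true".toList, "``\"flattenTeams\" : true``".toList),
   ("\"includeOrgUsers\": true".toList, "``\"includeOrgUsers\": true``".toList),
   ("repeat the `m` parameter".toList, "repeat the ``m`` parameter".toList)]

-- Source B's while-loop over position i: `content.startswith(old, i)` is `old.isPrefixOf` on the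
-- remaining characters (exact on the ASCII domain); the first matching pair wins, else copy one char.
def pvScanGo : List Char → List Char
  | [] => []
  | c :: t =>
    match h : pvAltFixes.find? (fun p => p.1.isPrefixOf (c :: t)) with
    | some (old, new) => new ++ pvScanGo (List.drop old.length (c :: t))
    | none => c :: pvScanGo t
termination_by cs => cs.length
decreasing_by
  · have hmem := List.mem_of_find?_eq_some h
    have hlen : 0 < old.length := by
      simp [pvAltFixes] at hmem
      rcases hmem with ⟨h1,h2⟩|⟨h1,h2⟩|⟨h1,h2⟩|⟨h1,h2⟩|⟨h1,h2⟩|⟨h1,h2⟩|⟨h1,h2⟩ <;> subst h1 <;> decide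
    simp
    omega
  · simp

def fix_backticks_alt (content : String) : String :=
  String.ofList (pvScanGo content.toList)

-- ===== PRECONDITION & SPEC =====
-- Pre_ excludes inputs in which two of the replaced backtick patterns overlap on a shared
-- backtick (the two fused substrings tested below): there A's sequential replaces double-use
-- the shared character while B's single scan consumes it once — both readings of such an
-- overlapping corner are defensible and neither is specified.
def Pre_fix_backticks (content : String) : Prop :=
  PySem.Str.isIn "`mongos`admin`" content = false ∧
  PySem.Str.isIn "`admin`mongos`" content = false
instance (content : String) : Decidable (Pre_fix_backticks content) := by
  unfold Pre_fix_backticks; infer_instance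

def pvWitness_fix_backticks : String := "use the (`&`) and `admin` databases on `mongos`"

def Spec_fix_backticks (content : String) (out : String) : Prop := out = fix_backticks_alt content
instance (content : String) (out : String) : Decidable (Spec_fix_backticks content out) := by
  unfold Spec_fix_backticks; infer_instance

-- ===== CLAIM (what is proved, stated in full; the proofs are below) =====
def Claim_equal_fix_backticks : Prop :=
  ∀ (content : String), Dom_fix_backticks content → Pre_fix_backticks content →
    Spec_fix_backticks content (fix_backticks content)

-- ===== LEMMAS AND PROOFS =====

-- unfolding equations for pvScanGo (well-founded recursion)
theorem pvScanGo_some (c : Char) (t old new : List Char)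
    (hf : pvAltFixes.find? (fun p => p.1.isPrefixOf (c :: t)) = some (old, new)) :
    pvScanGo (c :: t) = new ++ pvScanGo (List.drop old.length (c :: t)) := by
  conv_lhs => rw [pvScanGo]
  split
  · rename_i old' new' heq
    rw [hf] at heq
    cases heq
    rfl
  · rename_i heq
    rw [hf] at heq
    cases heq

theorem pvScanGo_none (c : Char) (t : List Char)
    (hf : pvAltFixes.find? (fun p => p.1.isPrefixOf (c :: t)) = none) :
    pvScanGo (c :: t) = c :: pvScanGo t := by
  conv_lhs => rw [pvScanGo]
  split
  · rename_i old' new' heq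
    rw [hf] at heq
    cases heq
  · rfl

-- structural mirror of PySem.Chars.replace (leftmost, non-overlapping), for nonempty patterns
def pvRepl : List Char → List Char → List Char → List Char
  | _, _, [] => []
  | old, new, c :: t =>
    if old ≠ [] ∧ old.isPrefixOf (c :: t) then new ++ pvRepl old new (List.drop old.length (c :: t))
    else c :: pvRepl old new t
termination_by _ _ cs => cs.length
decreasing_by
  · rename_i hcond
    have : 0 < old.length := by
      cases old with
      | nil => exact absurd rfl hcond.1
      | cons a b => simp
    simp
    omega
  · simp

theorem pvReplGo_eq (old new : List Char) (hold : old ≠ []) :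
    ∀ fuel l acc, l.length ≤ fuel →
      PySem.Chars.replace.go old new fuel l acc = acc.reverse ++ pvRepl old new l := by
  intro fuel
  induction fuel with
  | zero =>
    intro l acc hl
    have : l = [] := by cases l <;> simp_all
    subst this
    simp [PySem.Chars.replace.go, pvRepl]
  | succ n ih =>
    intro l acc hl
    cases l with
    | nil => simp [PySem.Chars.replace.go, pvRepl]
    | cons c t =>
      rw [PySem.Chars.replace.go]
      by_cases hp : old.isPrefixOf (c :: t)
      · have h0 : 0 < old.length := by
          cases old with
          | nil => exact absurd rfl hold
          | cons a b => simp
        rw [if_pos hp, ih _ _ (by simp at hl ⊢; omega)]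
        rw [pvRepl, if_pos ⟨hold, hp⟩]
        simp
      · rw [if_neg hp, ih _ _ (by simp at hl ⊢; omega)]
        rw [pvRepl, if_neg (by simp [hp])]
        simp

theorem pvReplace_eq (old new s : List Char) (hold : old ≠ []) :
    PySem.Chars.replace s old new = pvRepl old new s := by
  rw [PySem.Chars.replace]
  rw [if_neg (by simpa using hold)]
  simpa using pvReplGo_eq old new hold s.length s [] (Nat.le_refl _)

-- sequential application of a list of fixes (proof-side view of port A's foldl)
def pvSeq (fs : List (List Char × List Char)) (s : List Char) : List Char :=
  fs.foldl (fun s p => pvRepl p.1 p.2 s) s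

theorem pvSeq_nil (s : List Char) : pvSeq [] s = s := rfl

theorem pvSeq_cons (p : List Char × List Char) (fs : List (List Char × List Char)) (s : List Char) :
    pvSeq (p :: fs) s = pvSeq fs (pvRepl p.1 p.2 s) := rfl

theorem pvA_toList (s : String) :
    (fix_backticks s).toList = pvSeq pvAltFixes s.toList := by
  simp only [fix_backticks, pvSeq, pvAltFixes, List.foldl, PySem.Str.replace, String.toList_ofList]
  rw [pvReplace_eq, pvReplace_eq, pvReplace_eq, pvReplace_eq, pvReplace_eq, pvReplace_eq,
    pvReplace_eq] <;> decide

-- a prefix of an append is a prefix of the left part or extends it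
theorem pvPrefixCases {w u v : List Char} (h : w <+: u ++ v) :
    w <+: u ∨ (u <+: w ∧ w.drop u.length <+: v) := by
  by_cases hle : w.length ≤ u.length
  · exact Or.inl (List.prefix_of_prefix_length_le h (List.prefix_append u v) hle)
  · have hu : u <+: w := List.prefix_of_prefix_length_le (List.prefix_append u v) h (by omega)
    rcases hu with ⟨w', rfl⟩
    refine Or.inr ⟨⟨w', rfl⟩, ?_⟩
    rw [List.drop_left]
    rcases h with ⟨t, ht⟩
    rw [List.append_assoc] at ht
    exact ⟨t, (List.append_cancel_left ht)⟩

theorem pvRepl_nomatch (old new : List Char) (c : Char) (t : List Char)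
    (h : ¬ old <+: (c :: t)) :
    pvRepl old new (c :: t) = c :: pvRepl old new t := by
  rw [pvRepl, if_neg]
  simp [List.isPrefixOf_iff_prefix, h]

theorem pvRepl_match (old new v : List Char) (hold : old ≠ []) :
    pvRepl old new (old ++ v) = new ++ pvRepl old new v := by
  cases old with
  | nil => exact absurd rfl hold
  | cons o os =>
    show pvRepl (o :: os) new (o :: (os ++ v)) = _
    rw [pvRepl, if_pos]
    · have hdrop : List.drop (o :: os).length (o :: (os ++ v)) = v := by
        simpa using List.drop_left (o :: os) v
      rw [hdrop]
    · exact ⟨by simp, by simpa [List.isPrefixOf_iff_prefix] using List.prefix_append (o :: os) v⟩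

-- skip over a block u no occurrence of old starts inside
theorem pvSkip (old new : List Char) (hold : old ≠ []) :
    ∀ u v, (∀ j, j < u.length → ¬ old <+: ((u ++ v).drop j)) →
      pvRepl old new (u ++ v) = u ++ pvRepl old new v := by
  intro u
  induction u with
  | nil => intro v _; rfl
  | cons c u' ih =>
    intro v h
    have h0 : ¬ old <+: (c :: (u' ++ v)) := by simpa using h 0 (by simp)
    show pvRepl old new (c :: (u' ++ v)) = _
    rw [pvRepl_nomatch old new c (u' ++ v) h0, ih v (fun j hj => by simpa using h (j + 1) (by simpa using hj))]
    rfl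

-- decidable certificate: no occurrence of old can start inside u, whatever follows
def pvCrossFreeB (old u : List Char) : Bool :=
  (List.range u.length).all (fun j => !(old.isPrefixOf (u.drop j)) && !((u.drop j).isPrefixOf old))

theorem pvCrossFree_skip (old u : List Char) (hb : pvCrossFreeB old u = true) :
    ∀ v j, j < u.length → ¬ old <+: ((u ++ v).drop j) := by
  intro v j hj hpre
  have hb' := (List.all_eq_true.mp hb) j (List.mem_range.mpr hj)
  simp only [Bool.and_eq_true, Bool.not_eq_true'] at hb'
  rw [List.drop_append_of_le_length (Nat.le_of_lt hj)] at hpre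
  rcases pvPrefixCases hpre with h1 | ⟨h2, _⟩
  · rw [(List.isPrefixOf_iff_prefix).mpr h1] at hb'
    exact absurd hb'.1 (by simp)
  · rw [(List.isPrefixOf_iff_prefix).mpr h2] at hb'
    exact absurd hb'.2 (by simp)

-- certificate for prefix transfer: a prefix w of (pvRepl old new v) was already a prefix of v
def pvBcond (old new w : List Char) : Bool :=
  w.tails.all (fun w2 =>
    w2.isEmpty || (!(w2.isPrefixOf new) && !(new.isPrefixOf w2)) || w2.isPrefixOf old)

theorem pvTransfer (old new : List Char) (hold : old ≠ []) :
    ∀ v w, pvBcond old new w = true → w <+: pvRepl old new v → w <+: v := by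
  intro v
  induction v with
  | nil => intro w _ h; simpa [pvRepl] using h
  | cons c t ih =>
    intro w hB hw
    by_cases hp : old <+: (c :: t)
    · cases w with
      | nil => simp
      | cons a w' =>
        have hBw := (List.all_eq_true.mp hB) (a :: w') (by
          exact (List.mem_tails _ _).mpr (List.suffix_refl _))
        rcases hp with ⟨v', hv'⟩
        rw [← hv', pvRepl_match old new v' hold] at hw
        simp only [Bool.or_eq_true, Bool.and_eq_true, Bool.not_eq_true'] at hBw
        rcases hBw with (h1 | ⟨h2, h3⟩) | h4
        · exact absurd h1 (by simp)
        · rcases pvPrefixCases hw with hc1 | ⟨hc2, _⟩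
          · rw [(List.isPrefixOf_iff_prefix).mpr hc1] at h2
            simp at h2
          · rw [(List.isPrefixOf_iff_prefix).mpr hc2] at h3
            simp at h3
        · exact ((List.isPrefixOf_iff_prefix).mp h4).trans ⟨v', hv'⟩

    · rw [pvRepl_nomatch old new c t hp] at hw
      cases w with
      | nil => simp
      | cons a w' =>
        rcases (List.cons_prefix_cons).mp hw with ⟨rfl, hw'⟩
        have hB' : pvBcond old new w' = true := by
          rw [pvBcond, List.tails_cons, List.all_cons] at hB
          simp only [Bool.and_eq_true] at hB
          exact hB.2
        exact (List.cons_prefix_cons).mpr ⟨rfl, ih w' hB' hw'⟩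

theorem pvChain :
    ∀ (fs : List (List Char × List Char)) w v,
      (∀ p ∈ fs, p.1 ≠ [] ∧ pvBcond p.1 p.2 w = true) →
      w <+: pvSeq fs v → w <+: v := by
  intro fs
  induction fs with
  | nil => intro w v _ h; exact h
  | cons p fs ih =>
    intro w v h hw
    have hp := h p (by simp)
    rw [pvSeq_cons] at hw
    exact pvTransfer p.1 p.2 hp.1 v w hp.2 (ih w _ (fun q hq => h q (by simp [hq])) hw)

-- certificate for the no-match step: later patterns survive earlier replacements
def pvNoneOK : List (List Char × List Char) → Bool
  | [] => true
  | p :: rest => rest.all (fun r => pvBcond p.1 p.2 (r.1.drop 1)) && pvNoneOK rest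

theorem pvNoneCase :
    ∀ (fs : List (List Char × List Char)) (c : Char) (t : List Char),
      (∀ p ∈ fs, p.1 ≠ []) → pvNoneOK fs = true →
      (∀ p ∈ fs, ¬ p.1 <+: (c :: t)) →
      pvSeq fs (c :: t) = c :: pvSeq fs t := by
  intro fs c
  induction fs with
  | nil => intro t _ _ _; rfl
  | cons p fs ih =>
    intro t hne hOK h0
    rw [pvNoneOK, Bool.and_eq_true] at hOK
    rw [pvSeq_cons, pvRepl_nomatch p.1 p.2 c t (h0 p (by simp))]
    rw [ih (pvRepl p.1 p.2 t) (fun q hq => hne q (by simp [hq])) hOK.2 ?_, pvSeq_cons]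
    intro r hr hpre
    rcases hrt : r.1 with _ | ⟨r0, rtail⟩
    · exact hne r (by simp [hr]) hrt
    · rw [hrt] at hpre
      rcases (List.cons_prefix_cons).mp hpre with ⟨rfl, hw⟩
      have hB : pvBcond p.1 p.2 rtail = true := by
        have := (List.all_eq_true.mp hOK.1) r hr
        simpa [hrt] using this
      have := pvTransfer p.1 p.2 (hne p (by simp)) t rtail hB hw
      exact h0 r (by simp [hr]) (by rw [hrt]; exact (List.cons_prefix_cons).mpr ⟨rfl, this⟩)

-- list-level precondition
def pvPreL (s : List Char) : Prop :=
  ¬ "`mongos`admin`".toList <:+: s ∧ ¬ "`admin`mongos`".toList <:+: s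

theorem pvPreL_mono {s t : List Char} (h : pvPreL s) (ht : t <:+: s) : pvPreL t :=
  ⟨fun hh => h.1 (hh.trans ht), fun hh => h.2 (hh.trans ht)⟩

-- pointwise form of the skip condition, decided on literals
theorem pvSkipPoint (u old v : List Char) (j : Nat) (hj : j ≤ u.length)
    (h1 : old.isPrefixOf (u.drop j) = false) (h2 : (u.drop j).isPrefixOf old = false) :
    ¬ old <+: ((u ++ v).drop j) := by
  intro hpre
  rw [List.drop_append_of_le_length hj] at hpre
  rcases pvPrefixCases hpre with hc | ⟨hc, _⟩
  · rw [(List.isPrefixOf_iff_prefix).mpr hc] at h1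
    cases h1
  · rw [(List.isPrefixOf_iff_prefix).mpr hc] at h2
    cases h2

theorem pvSkipCF (old new u : List Char) (hold : old ≠ []) (hb : pvCrossFreeB old u = true)
    (v : List Char) : pvRepl old new (u ++ v) = u ++ pvRepl old new v :=
  pvSkip old new hold u v (fun j hj => pvCrossFree_skip old u hb v j hj)

-- '`admin`' cannot start inside '``mongos``' unless X continues with 'admin`'
theorem pvSkipAdminNew1 (X : List Char) (hX : ¬ "admin`".toList <+: X) :
    pvRepl "`admin`".toList "``admin``".toList ("``mongos``".toList ++ X)
      = "``mongos``".toList ++ pvRepl "`admin`".toList "``admin``".toList X := by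
  apply pvSkip _ _ (by decide)
  intro j hj hpre
  have hj' : j < 10 := by
    have h10 : ("``mongos``".toList).length = 10 := by decide
    omega
  interval_cases j
  case _ => exact pvSkipPoint _ _ _ 0 (by decide) (by decide) (by decide) hpre
  case _ => exact pvSkipPoint _ _ _ 1 (by decide) (by decide) (by decide) hpre
  case _ => exact pvSkipPoint _ _ _ 2 (by decide) (by decide) (by decide) hpre
  case _ => exact pvSkipPoint _ _ _ 3 (by decide) (by decide) (by decide) hpre
  case _ => exact pvSkipPoint _ _ _ 4 (by decide) (by decide) (by decide) hpre
  case _ => exact pvSkipPoint _ _ _ 5 (by decide) (by decide) (by decide) hpre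
  case _ => exact pvSkipPoint _ _ _ 6 (by decide) (by decide) (by decide) hpre
  case _ => exact pvSkipPoint _ _ _ 7 (by decide) (by decide) (by decide) hpre
  case _ => exact pvSkipPoint _ _ _ 8 (by decide) (by decide) (by decide) hpre
  case _ =>
    rw [List.drop_append_of_le_length (by decide)] at hpre
    rcases pvPrefixCases hpre with hc | ⟨_, hc⟩
    · have hfalse : ("`admin`".toList).isPrefixOf (("``mongos``".toList).drop 9) = false := by decide
      rw [(List.isPrefixOf_iff_prefix).mpr hc] at hfalse
      cases hfalse
    · apply hX
      have e : ("`admin`".toList).drop (("``mongos``".toList).drop 9).length = "admin`".toList := by decide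
      rw [e] at hc
      exact hc

-- '`mongos`' cannot start inside '`admin`' unless the rest continues with 'mongos`'
theorem pvSkipMongosOld3 (X : List Char) (hX : ¬ "mongos`".toList <+: X) :
    pvRepl "`mongos`".toList "``mongos``".toList ("`admin`".toList ++ X)
      = "`admin`".toList ++ pvRepl "`mongos`".toList "``mongos``".toList X := by
  apply pvSkip _ _ (by decide)
  intro j hj hpre
  have hj' : j < 7 := by
    have h7 : ("`admin`".toList).length = 7 := by decide
    omega
  interval_cases j
  case _ => exact pvSkipPoint _ _ _ 0 (by decide) (by decide) (by decide) hpre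
  case _ => exact pvSkipPoint _ _ _ 1 (by decide) (by decide) (by decide) hpre
  case _ => exact pvSkipPoint _ _ _ 2 (by decide) (by decide) (by decide) hpre
  case _ => exact pvSkipPoint _ _ _ 3 (by decide) (by decide) (by decide) hpre
  case _ => exact pvSkipPoint _ _ _ 4 (by decide) (by decide) (by decide) hpre
  case _ => exact pvSkipPoint _ _ _ 5 (by decide) (by decide) (by decide) hpre
  case _ =>
    rw [List.drop_append_of_le_length (by decide)] at hpre
    rcases pvPrefixCases hpre with hc | ⟨_, hc⟩
    · have hfalse : ("`mongos`".toList).isPrefixOf (("`admin`".toList).drop 6) = false := by decide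
      rw [(List.isPrefixOf_iff_prefix).mpr hc] at hfalse
      cases hfalse
    · apply hX
      have e : ("`mongos`".toList).drop (("`admin`".toList).drop 6).length = "mongos`".toList := by decide
      rw [e] at hc
      exact hc

theorem pvSeq_unfold (s : List Char) :
    pvSeq pvAltFixes s = pvRepl "repeat the `m` parameter".toList "repeat the ``m`` parameter".toList (pvRepl "\"includeOrgUsers\": true".toList "``\"includeOrgUsers\": true``".toList (pvRepl "\"flattenTeams\" : true".toList "``\"flattenTeams\" : true``".toList (pvRepl "(`%2F`)".toList "(``%2F``)".toList (pvRepl "`admin`".toList "``admin``".toList (pvRepl "(`&`)".toList "(``&``)".toList (pvRepl "`mongos`".toList "``mongos``".toList s)))))) := by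
  simp only [pvAltFixes, pvSeq_cons, pvSeq_nil]

theorem pvMain_nil : pvSeq pvAltFixes [] = pvScanGo [] := by
  rw [pvSeq_unfold, pvScanGo]
  simp [pvRepl]

theorem pvMain : ∀ (n : Nat) (s : List Char), s.length ≤ n → pvPreL s →
    pvSeq pvAltFixes s = pvScanGo s := by
  intro n
  induction n with
  | zero =>
    intro s hl _
    have hs : s = [] := by cases s <;> simp_all
    subst hs
    exact pvMain_nil
  | succ n ih =>
    intro s hl hpre
    cases s with
    | nil => exact pvMain_nil
    | cons c t =>
      by_cases h1 : "`mongos`".toList <+: (c :: t)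
      · -- pattern 1 is the (unique) match at this position
        rcases h1 with ⟨rest, hs⟩
        have epos : ("`mongos`".toList).isPrefixOf (c :: t) = true := by
          rw [List.isPrefixOf_iff_prefix]
          exact ⟨rest, hs⟩
        have hf : pvAltFixes.find? (fun p => p.1.isPrefixOf (c :: t)) = some ("`mongos`".toList, "``mongos``".toList) := by
          simp only [pvAltFixes, List.find?_cons, epos]
        have hX : ¬ "admin`".toList <+: pvRepl "(`&`)".toList "(``&``)".toList (pvRepl "`mongos`".toList "``mongos``".toList rest) := by
          intro hc
          have hchain : "admin`".toList <+: rest := by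
            apply pvChain [("`mongos`".toList, "``mongos``".toList), ("(`&`)".toList, "(``&``)".toList)] _ rest (by decide)
            simpa only [pvSeq_cons, pvSeq_nil] using hc
          apply hpre.1
          rcases hchain with ⟨z, hz⟩
          refine ⟨[], z, ?_⟩
          have hfu : "`mongos`admin`".toList = "`mongos`".toList ++ "admin`".toList := by decide
          rw [hfu, ← hs, ← hz]
          simp
        have hlen : rest.length ≤ n := by
          have hlc := congrArg List.length hs
          have hol : ("`mongos`".toList).length = 8 := by decide
          rw [List.length_append, hol] at hlc
          simp only [List.length_cons] at hlc
          simp only [List.length_cons] at hl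
          omega
        have hpre' : pvPreL rest := pvPreL_mono hpre ⟨"`mongos`".toList, [], by simpa using hs⟩
        rw [pvScanGo_some c t _ _ hf, ← hs, List.drop_left, pvSeq_unfold]
        rw [pvRepl_match _ _ _ (by decide)]
        rw [pvSkipCF "(`&`)".toList "(``&``)".toList "``mongos``".toList (by decide) (by decide)]
        rw [pvSkipAdminNew1 _ hX]
        rw [pvSkipCF "(`%2F`)".toList "(``%2F``)".toList "``mongos``".toList (by decide) (by decide)]
        rw [pvSkipCF "\"flattenTeams\" : true".toList "``\"flattenTeams\" : true``".toList "``mongos``".toList (by decide) (by decide)]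
        rw [pvSkipCF "\"includeOrgUsers\": true".toList "``\"includeOrgUsers\": true``".toList "``mongos``".toList (by decide) (by decide)]
        rw [pvSkipCF "repeat the `m` parameter".toList "repeat the ``m`` parameter".toList "``mongos``".toList (by decide) (by decide)]
        rw [← pvSeq_unfold, ih rest hlen hpre']
      by_cases h2 : "(`&`)".toList <+: (c :: t)
      · -- pattern 2 is the (unique) match at this position
        rcases h2 with ⟨rest, hs⟩
        have e1 : ("`mongos`".toList).isPrefixOf (c :: t) = false := by
          rw [← Bool.not_eq_true, List.isPrefixOf_iff_prefix]
          exact h1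
        have epos : ("(`&`)".toList).isPrefixOf (c :: t) = true := by
          rw [List.isPrefixOf_iff_prefix]
          exact ⟨rest, hs⟩
        have hf : pvAltFixes.find? (fun p => p.1.isPrefixOf (c :: t)) = some ("(`&`)".toList, "(``&``)".toList) := by
          simp only [pvAltFixes, List.find?_cons, e1, epos]
        have hlen : rest.length ≤ n := by
          have hlc := congrArg List.length hs
          have hol : ("(`&`)".toList).length = 5 := by decide
          rw [List.length_append, hol] at hlc
          simp only [List.length_cons] at hlc
          simp only [List.length_cons] at hl
          omega
        have hpre' : pvPreL rest := pvPreL_mono hpre ⟨"(`&`)".toList, [], by simpa using hs⟩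
        rw [pvScanGo_some c t _ _ hf, ← hs, List.drop_left, pvSeq_unfold]
        rw [pvSkipCF "`mongos`".toList "``mongos``".toList "(`&`)".toList (by decide) (by decide)]
        rw [pvRepl_match _ _ _ (by decide)]
        rw [pvSkipCF "`admin`".toList "``admin``".toList "(``&``)".toList (by decide) (by decide)]
        rw [pvSkipCF "(`%2F`)".toList "(``%2F``)".toList "(``&``)".toList (by decide) (by decide)]
        rw [pvSkipCF "\"flattenTeams\" : true".toList "``\"flattenTeams\" : true``".toList "(``&``)".toList (by decide) (by decide)]
        rw [pvSkipCF "\"includeOrgUsers\": true".toList "``\"includeOrgUsers\": true``".toList "(``&``)".toList (by decide) (by decide)]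
        rw [pvSkipCF "repeat the `m` parameter".toList "repeat the ``m`` parameter".toList "(``&``)".toList (by decide) (by decide)]
        rw [← pvSeq_unfold, ih rest hlen hpre']
      by_cases h3 : "`admin`".toList <+: (c :: t)
      · -- pattern 3 is the (unique) match at this position
        rcases h3 with ⟨rest, hs⟩
        have e1 : ("`mongos`".toList).isPrefixOf (c :: t) = false := by
          rw [← Bool.not_eq_true, List.isPrefixOf_iff_prefix]
          exact h1
        have e2 : ("(`&`)".toList).isPrefixOf (c :: t) = false := by
          rw [← Bool.not_eq_true, List.isPrefixOf_iff_prefix]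
          exact h2
        have epos : ("`admin`".toList).isPrefixOf (c :: t) = true := by
          rw [List.isPrefixOf_iff_prefix]
          exact ⟨rest, hs⟩
        have hf : pvAltFixes.find? (fun p => p.1.isPrefixOf (c :: t)) = some ("`admin`".toList, "``admin``".toList) := by
          simp only [pvAltFixes, List.find?_cons, e1, e2, epos]
        have hM : ¬ "mongos`".toList <+: rest := by
          intro hc
          apply hpre.2
          rcases hc with ⟨z, hz⟩
          refine ⟨[], z, ?_⟩
          have hfu : "`admin`mongos`".toList = "`admin`".toList ++ "mongos`".toList := by decide
          rw [hfu, ← hs, ← hz]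
          simp
        have hlen : rest.length ≤ n := by
          have hlc := congrArg List.length hs
          have hol : ("`admin`".toList).length = 7 := by decide
          rw [List.length_append, hol] at hlc
          simp only [List.length_cons] at hlc
          simp only [List.length_cons] at hl
          omega
        have hpre' : pvPreL rest := pvPreL_mono hpre ⟨"`admin`".toList, [], by simpa using hs⟩
        rw [pvScanGo_some c t _ _ hf, ← hs, List.drop_left, pvSeq_unfold]
        rw [pvSkipMongosOld3 _ hM]
        rw [pvSkipCF "(`&`)".toList "(``&``)".toList "`admin`".toList (by decide) (by decide)]
        rw [pvRepl_match _ _ _ (by decide)]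
        rw [pvSkipCF "(`%2F`)".toList "(``%2F``)".toList "``admin``".toList (by decide) (by decide)]
        rw [pvSkipCF "\"flattenTeams\" : true".toList "``\"flattenTeams\" : true``".toList "``admin``".toList (by decide) (by decide)]
        rw [pvSkipCF "\"includeOrgUsers\": true".toList "``\"includeOrgUsers\": true``".toList "``admin``".toList (by decide) (by decide)]
        rw [pvSkipCF "repeat the `m` parameter".toList "repeat the ``m`` parameter".toList "``admin``".toList (by decide) (by decide)]
        rw [← pvSeq_unfold, ih rest hlen hpre']
      by_cases h4 : "(`%2F`)".toList <+: (c :: t)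
      · -- pattern 4 is the (unique) match at this position
        rcases h4 with ⟨rest, hs⟩
        have e1 : ("`mongos`".toList).isPrefixOf (c :: t) = false := by
          rw [← Bool.not_eq_true, List.isPrefixOf_iff_prefix]
          exact h1
        have e2 : ("(`&`)".toList).isPrefixOf (c :: t) = false := by
          rw [← Bool.not_eq_true, List.isPrefixOf_iff_prefix]
          exact h2
        have e3 : ("`admin`".toList).isPrefixOf (c :: t) = false := by
          rw [← Bool.not_eq_true, List.isPrefixOf_iff_prefix]
          exact h3
        have epos : ("(`%2F`)".toList).isPrefixOf (c :: t) = true := by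
          rw [List.isPrefixOf_iff_prefix]
          exact ⟨rest, hs⟩
        have hf : pvAltFixes.find? (fun p => p.1.isPrefixOf (c :: t)) = some ("(`%2F`)".toList, "(``%2F``)".toList) := by
          simp only [pvAltFixes, List.find?_cons, e1, e2, e3, epos]
        have hlen : rest.length ≤ n := by
          have hlc := congrArg List.length hs
          have hol : ("(`%2F`)".toList).length = 7 := by decide
          rw [List.length_append, hol] at hlc
          simp only [List.length_cons] at hlc
          simp only [List.length_cons] at hl
          omega
        have hpre' : pvPreL rest := pvPreL_mono hpre ⟨"(`%2F`)".toList, [], by simpa using hs⟩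
        rw [pvScanGo_some c t _ _ hf, ← hs, List.drop_left, pvSeq_unfold]
        rw [pvSkipCF "`mongos`".toList "``mongos``".toList "(`%2F`)".toList (by decide) (by decide)]
        rw [pvSkipCF "(`&`)".toList "(``&``)".toList "(`%2F`)".toList (by decide) (by decide)]
        rw [pvSkipCF "`admin`".toList "``admin``".toList "(`%2F`)".toList (by decide) (by decide)]
        rw [pvRepl_match _ _ _ (by decide)]
        rw [pvSkipCF "\"flattenTeams\" : true".toList "``\"flattenTeams\" : true``".toList "(``%2F``)".toList (by decide) (by decide)]
        rw [pvSkipCF "\"includeOrgUsers\": true".toList "``\"includeOrgUsers\": true``".toList "(``%2F``)".toList (by decide) (by decide)]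
        rw [pvSkipCF "repeat the `m` parameter".toList "repeat the ``m`` parameter".toList "(``%2F``)".toList (by decide) (by decide)]
        rw [← pvSeq_unfold, ih rest hlen hpre']
      by_cases h5 : "\"flattenTeams\" : true".toList <+: (c :: t)
      · -- pattern 5 is the (unique) match at this position
        rcases h5 with ⟨rest, hs⟩
        have e1 : ("`mongos`".toList).isPrefixOf (c :: t) = false := by
          rw [← Bool.not_eq_true, List.isPrefixOf_iff_prefix]
          exact h1
        have e2 : ("(`&`)".toList).isPrefixOf (c :: t) = false := by
          rw [← Bool.not_eq_true, List.isPrefixOf_iff_prefix]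
          exact h2
        have e3 : ("`admin`".toList).isPrefixOf (c :: t) = false := by
          rw [← Bool.not_eq_true, List.isPrefixOf_iff_prefix]
          exact h3
        have e4 : ("(`%2F`)".toList).isPrefixOf (c :: t) = false := by
          rw [← Bool.not_eq_true, List.isPrefixOf_iff_prefix]
          exact h4
        have epos : ("\"flattenTeams\" : true".toList).isPrefixOf (c :: t) = true := by
          rw [List.isPrefixOf_iff_prefix]
          exact ⟨rest, hs⟩
        have hf : pvAltFixes.find? (fun p => p.1.isPrefixOf (c :: t)) = some ("\"flattenTeams\" : true".toList, "``\"flattenTeams\" : true``".toList) := by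
          simp only [pvAltFixes, List.find?_cons, e1, e2, e3, e4, epos]
        have hlen : rest.length ≤ n := by
          have hlc := congrArg List.length hs
          have hol : ("\"flattenTeams\" : true".toList).length = 21 := by decide
          rw [List.length_append, hol] at hlc
          simp only [List.length_cons] at hlc
          simp only [List.length_cons] at hl
          omega
        have hpre' : pvPreL rest := pvPreL_mono hpre ⟨"\"flattenTeams\" : true".toList, [], by simpa using hs⟩
        rw [pvScanGo_some c t _ _ hf, ← hs, List.drop_left, pvSeq_unfold]
        rw [pvSkipCF "`mongos`".toList "``mongos``".toList "\"flattenTeams\" : true".toList (by decide) (by decide)]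
        rw [pvSkipCF "(`&`)".toList "(``&``)".toList "\"flattenTeams\" : true".toList (by decide) (by decide)]
        rw [pvSkipCF "`admin`".toList "``admin``".toList "\"flattenTeams\" : true".toList (by decide) (by decide)]
        rw [pvSkipCF "(`%2F`)".toList "(``%2F``)".toList "\"flattenTeams\" : true".toList (by decide) (by decide)]
        rw [pvRepl_match _ _ _ (by decide)]
        rw [pvSkipCF "\"includeOrgUsers\": true".toList "``\"includeOrgUsers\": true``".toList "``\"flattenTeams\" : true``".toList (by decide) (by decide)]
        rw [pvSkipCF "repeat the `m` parameter".toList "repeat the ``m`` parameter".toList "``\"flattenTeams\" : true``".toList (by decide) (by decide)]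
        rw [← pvSeq_unfold, ih rest hlen hpre']
      by_cases h6 : "\"includeOrgUsers\": true".toList <+: (c :: t)
      · -- pattern 6 is the (unique) match at this position
        rcases h6 with ⟨rest, hs⟩
        have e1 : ("`mongos`".toList).isPrefixOf (c :: t) = false := by
          rw [← Bool.not_eq_true, List.isPrefixOf_iff_prefix]
          exact h1
        have e2 : ("(`&`)".toList).isPrefixOf (c :: t) = false := by
          rw [← Bool.not_eq_true, List.isPrefixOf_iff_prefix]
          exact h2
        have e3 : ("`admin`".toList).isPrefixOf (c :: t) = false := by
          rw [← Bool.not_eq_true, List.isPrefixOf_iff_prefix]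
          exact h3
        have e4 : ("(`%2F`)".toList).isPrefixOf (c :: t) = false := by
          rw [← Bool.not_eq_true, List.isPrefixOf_iff_prefix]
          exact h4
        have e5 : ("\"flattenTeams\" : true".toList).isPrefixOf (c :: t) = false := by
          rw [← Bool.not_eq_true, List.isPrefixOf_iff_prefix]
          exact h5
        have epos : ("\"includeOrgUsers\": true".toList).isPrefixOf (c :: t) = true := by
          rw [List.isPrefixOf_iff_prefix]
          exact ⟨rest, hs⟩
        have hf : pvAltFixes.find? (fun p => p.1.isPrefixOf (c :: t)) = some ("\"includeOrgUsers\": true".toList, "``\"includeOrgUsers\": true``".toList) := by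
          simp only [pvAltFixes, List.find?_cons, e1, e2, e3, e4, e5, epos]
        have hlen : rest.length ≤ n := by
          have hlc := congrArg List.length hs
          have hol : ("\"includeOrgUsers\": true".toList).length = 23 := by decide
          rw [List.length_append, hol] at hlc
          simp only [List.length_cons] at hlc
          simp only [List.length_cons] at hl
          omega
        have hpre' : pvPreL rest := pvPreL_mono hpre ⟨"\"includeOrgUsers\": true".toList, [], by simpa using hs⟩
        rw [pvScanGo_some c t _ _ hf, ← hs, List.drop_left, pvSeq_unfold]
        rw [pvSkipCF "`mongos`".toList "``mongos``".toList "\"includeOrgUsers\": true".toList (by decide) (by decide)]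
        rw [pvSkipCF "(`&`)".toList "(``&``)".toList "\"includeOrgUsers\": true".toList (by decide) (by decide)]
        rw [pvSkipCF "`admin`".toList "``admin``".toList "\"includeOrgUsers\": true".toList (by decide) (by decide)]
        rw [pvSkipCF "(`%2F`)".toList "(``%2F``)".toList "\"includeOrgUsers\": true".toList (by decide) (by decide)]
        rw [pvSkipCF "\"flattenTeams\" : true".toList "``\"flattenTeams\" : true``".toList "\"includeOrgUsers\": true".toList (by decide) (by decide)]
        rw [pvRepl_match _ _ _ (by decide)]
        rw [pvSkipCF "repeat the `m` parameter".toList "repeat the ``m`` parameter".toList "``\"includeOrgUsers\": true``".toList (by decide) (by decide)]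
        rw [← pvSeq_unfold, ih rest hlen hpre']
      by_cases h7 : "repeat the `m` parameter".toList <+: (c :: t)
      · -- pattern 7 is the (unique) match at this position
        rcases h7 with ⟨rest, hs⟩
        have e1 : ("`mongos`".toList).isPrefixOf (c :: t) = false := by
          rw [← Bool.not_eq_true, List.isPrefixOf_iff_prefix]
          exact h1
        have e2 : ("(`&`)".toList).isPrefixOf (c :: t) = false := by
          rw [← Bool.not_eq_true, List.isPrefixOf_iff_prefix]
          exact h2
        have e3 : ("`admin`".toList).isPrefixOf (c :: t) = false := by
          rw [← Bool.not_eq_true, List.isPrefixOf_iff_prefix]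
          exact h3
        have e4 : ("(`%2F`)".toList).isPrefixOf (c :: t) = false := by
          rw [← Bool.not_eq_true, List.isPrefixOf_iff_prefix]
          exact h4
        have e5 : ("\"flattenTeams\" : true".toList).isPrefixOf (c :: t) = false := by
          rw [← Bool.not_eq_true, List.isPrefixOf_iff_prefix]
          exact h5
        have e6 : ("\"includeOrgUsers\": true".toList).isPrefixOf (c :: t) = false := by
          rw [← Bool.not_eq_true, List.isPrefixOf_iff_prefix]
          exact h6
        have epos : ("repeat the `m` parameter".toList).isPrefixOf (c :: t) = true := by
          rw [List.isPrefixOf_iff_prefix]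
          exact ⟨rest, hs⟩
        have hf : pvAltFixes.find? (fun p => p.1.isPrefixOf (c :: t)) = some ("repeat the `m` parameter".toList, "repeat the ``m`` parameter".toList) := by
          simp only [pvAltFixes, List.find?_cons, e1, e2, e3, e4, e5, e6, epos]
        have hlen : rest.length ≤ n := by
          have hlc := congrArg List.length hs
          have hol : ("repeat the `m` parameter".toList).length = 24 := by decide
          rw [List.length_append, hol] at hlc
          simp only [List.length_cons] at hlc
          simp only [List.length_cons] at hl
          omega
        have hpre' : pvPreL rest := pvPreL_mono hpre ⟨"repeat the `m` parameter".toList, [], by simpa using hs⟩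
        rw [pvScanGo_some c t _ _ hf, ← hs, List.drop_left, pvSeq_unfold]
        rw [pvSkipCF "`mongos`".toList "``mongos``".toList "repeat the `m` parameter".toList (by decide) (by decide)]
        rw [pvSkipCF "(`&`)".toList "(``&``)".toList "repeat the `m` parameter".toList (by decide) (by decide)]
        rw [pvSkipCF "`admin`".toList "``admin``".toList "repeat the `m` parameter".toList (by decide) (by decide)]
        rw [pvSkipCF "(`%2F`)".toList "(``%2F``)".toList "repeat the `m` parameter".toList (by decide) (by decide)]
        rw [pvSkipCF "\"flattenTeams\" : true".toList "``\"flattenTeams\" : true``".toList "repeat the `m` parameter".toList (by decide) (by decide)]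
        rw [pvSkipCF "\"includeOrgUsers\": true".toList "``\"includeOrgUsers\": true``".toList "repeat the `m` parameter".toList (by decide) (by decide)]
        rw [pvRepl_match _ _ _ (by decide)]
        rw [← pvSeq_unfold, ih rest hlen hpre']
      · -- no pattern matches at this position
        have H0 : ∀ p ∈ pvAltFixes, ¬ p.1 <+: (c :: t) := by
          intro p hp
          simp only [pvAltFixes, List.mem_cons, List.not_mem_nil, or_false] at hp
          rcases hp with rfl|rfl|rfl|rfl|rfl|rfl|rfl
          · exact h1
          · exact h2
          · exact h3
          · exact h4
          · exact h5
          · exact h6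
          · exact h7
        have hf : pvAltFixes.find? (fun p => p.1.isPrefixOf (c :: t)) = none := by
          rw [List.find?_eq_none]
          intro p hp
          simpa [List.isPrefixOf_iff_prefix] using H0 p hp
        have hlen : t.length ≤ n := by
          simp only [List.length_cons] at hl
          omega
        have hpre' : pvPreL t := pvPreL_mono hpre ⟨[c], [], by simp⟩
        rw [pvScanGo_none c t hf, pvNoneCase pvAltFixes c t (by decide) (by decide) H0,
          ih t hlen hpre']

-- ===== VERDICT (by name: the statement is the Claim_ definition above) =====
theorem fix_backticks_spec : Claim_equal_fix_backticks := by
  intro content _ hpre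
  unfold Spec_fix_backticks fix_backticks_alt
  have hpreL : pvPreL content.toList := by
    constructor
    · intro hh
      have := (PySem.Str.isIn_iff_infix "`mongos`admin`" content).mpr hh
      rw [hpre.1] at this
      cases this
    · intro hh
      have := (PySem.Str.isIn_iff_infix "`admin`mongos`" content).mpr hh
      rw [hpre.2] at this
      cases this
  have := pvMain content.toList.length content.toList (Nat.le_refl _) hpreL
  apply String.toList_inj.mp
  rw [String.toList_ofList, pvA_toList, this]
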